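-- pv_equiv track=rewrite | github.com/tugloo1/leetcode | problem_290.py | convert_to_base_string
-- ===== SOURCE A (Python) =====
-- def convert_to_base_string(inp_string: str):
--     seen_map = {}
--     output = ''
--     current_num = 1
--     for word in inp_string:
--         if word not in seen_map:
--             seen_map[word] = current_num
--             current_num += 1
--         output += str(seen_map[word])
--     return output
-- ===== SOURCE B (Python) =====
-- def convert_to_base_string(inp_string: str):
--     # rank of a char = number of distinct chars in the prefix ending at its first occurrence
--     return ''.join(str(len(set(inp_string[:inp_string.find(c) + 1]))) for c in inp_string)
-- ===== Notes on version B (the rewrite author's own statement) =====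
-- stated objective: alternative
-- what changed: Drops A's mutable dict/counter state entirely: B computes each character's number independently as the count of distinct characters in the prefix of the input ending at that character's first occurrence (find + slice + set), then joins.
import Mathlib
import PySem

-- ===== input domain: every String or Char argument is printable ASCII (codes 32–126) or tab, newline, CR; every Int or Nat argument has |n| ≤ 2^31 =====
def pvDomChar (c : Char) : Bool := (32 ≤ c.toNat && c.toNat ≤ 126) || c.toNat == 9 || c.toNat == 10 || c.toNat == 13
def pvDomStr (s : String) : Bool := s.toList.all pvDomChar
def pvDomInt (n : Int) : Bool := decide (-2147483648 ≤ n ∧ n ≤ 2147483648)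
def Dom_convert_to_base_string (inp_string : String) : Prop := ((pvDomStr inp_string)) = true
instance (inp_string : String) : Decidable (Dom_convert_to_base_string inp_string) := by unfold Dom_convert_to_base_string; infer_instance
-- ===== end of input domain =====

-- B drops A's mutable dict/counter state: each character's number is computed independently as the
-- count of distinct characters in the input prefix ending at that character's first occurrence
-- (objective: alternative).

-- ===== PORT A =====
-- one loop step of A: update seen_map / current_num, then append str(seen_map[word])
-- (Python's seen_map[word] always finds the key here, so getD 0 is exact)
def pvAStep (st : PySem.Dict Char Int × List Char × Int) (word : Char) :
    PySem.Dict Char Int × List Char × Int :=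
  let seen_map := st.1
  let output := st.2.1
  let current_num := st.2.2
  let upd : PySem.Dict Char Int × Int :=
    if seen_map.contains word then (seen_map, current_num)
    else (seen_map.insert word current_num, current_num + 1)
  (upd.1, output ++ PySem.Int.toChars (upd.1.getD word 0), upd.2)

def convert_to_base_string (inp_string : String) : String :=
  let r := inp_string.toList.foldl pvAStep (PySem.Dict.empty, [], 1)
  String.ofList r.2.1

-- ===== PORT B =====
-- str(len(set(inp_string[:inp_string.find(c) + 1])))
def pvBEmit (inp_string : String) (c : Char) : List Char :=
  PySem.Int.toChars
    ((PySem.Set.len (PySem.Set.ofList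
      (PySem.Str.slice inp_string none
        (some (PySem.Str.find inp_string (String.ofList [c]) + 1))).toList) : Int))

def convert_to_base_string_alt (inp_string : String) : String :=
  String.ofList ((inp_string.toList.map (fun c => pvBEmit inp_string c)).flatten)

-- ===== PRECONDITION & SPEC =====
def Spec_convert_to_base_string (inp_string : String) (out : String) : Prop := out = convert_to_base_string_alt inp_string
instance (inp_string : String) (out : String) : Decidable (Spec_convert_to_base_string inp_string out) := by unfold Spec_convert_to_base_string; infer_instance

-- ===== CLAIM (what is proved, stated in full; the proofs are below) =====
def Claim_equal_convert_to_base_string : Prop := ∀ (inp_string : String), Dom_convert_to_base_string inp_string → Spec_convert_to_base_string inp_string (convert_to_base_string inp_string)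

-- ===== LEMMAS AND PROOFS =====

-- the rank (1-based first-seen number) that A emits for c, as digits
def pvEmitRank (order : List Char) (c : Char) : List Char :=
  PySem.Int.toChars ((((PySem.List.index? order c).getD 0 : Nat) : Int) + 1)

-- A's seen_map after processing a prefix with first-seen order u, numbered from 1
def pvDictOf (u : List Char) : PySem.Dict Char Int :=
  PySem.Dict.mk ((PySem.List.enumerate u 1).map (fun p => (p.2, p.1)))

theorem pvEnum_any (u : List Char) (c : Char) : ∀ s,
    (((PySem.List.enumerate u s).map (fun p => (p.2, p.1))).any (fun p => p.1 == c)) = u.contains c := by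
  induction u with
  | nil => intro s; simp [PySem.List.enumerate_nil]
  | cons x xs ih =>
      intro s
      by_cases hxc : x = c
      · subst hxc; simp [PySem.List.enumerate_cons, ih (s + 1)]
      · simp [PySem.List.enumerate_cons, ih (s + 1), hxc, Ne.symm hxc]

theorem pvDictOf_contains (u : List Char) (c : Char) :
    (pvDictOf u).contains c = decide (c ∈ u) := by
  unfold pvDictOf PySem.Dict.contains
  rw [pvEnum_any u c 1]
  simp

theorem pvDictOf_get? (u : List Char) (s : Int) (c : Char) :
    (PySem.Dict.mk ((PySem.List.enumerate u s).map (fun p => (p.2, p.1)))).get? c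
      = (PySem.List.index? u c).map (fun i : Nat => s + (i : Int)) := by
  induction u generalizing s with
  | nil => simp [PySem.Dict.get?, PySem.List.enumerate_nil, PySem.List.index?]
  | cons x xs ih =>
      by_cases h : x = c
      · subst h
        rw [PySem.List.index?_cons_self]
        simp [PySem.Dict.get?, PySem.List.enumerate_cons]
      · rw [PySem.List.index?_cons_of_ne xs h]
        have hih := ih (s + 1)
        simp [PySem.Dict.get?, PySem.List.enumerate_cons, h, Option.map_map] at hih ⊢
        rw [hih]
        cases List.idxOf? c xs with
        | none => rfl
        | some k => simp; omega

-- dedup (p ++ [c]) as one Set.add step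
theorem pvDedup_snoc (p : List Char) (c : Char) :
    PySem.List.dedup (p ++ [c]) = PySem.Set.add (PySem.List.dedup p) c := by
  simp [PySem.List.dedup, PySem.Set.ofList_eq_foldl, List.foldl_append, PySem.Set.add]

theorem pvFoldl_add_prefix (t : List Char) (s : PySem.Set Char) :
    ∃ r, t.foldl PySem.Set.add s = s ++ r := by
  induction t generalizing s with
  | nil => exact ⟨[], by simp⟩
  | cons x xs ih =>
      rcases ih (PySem.Set.add s x) with ⟨r, hr⟩
      simp only [List.foldl_cons]
      by_cases h : s.contains x = true
      · have hx : PySem.Set.add s x = s := by unfold PySem.Set.add; rw [if_pos h]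
        rw [hx] at hr
        exact ⟨r, by rw [hx]; exact hr⟩
      · have hx : PySem.Set.add s x = s ++ [x] := by unfold PySem.Set.add; rw [if_neg h]
        rw [hx] at hr
        exact ⟨x :: r, by rw [hx]; simpa using hr⟩

theorem pvDedup_append_prefix (p t : List Char) :
    ∃ r, PySem.List.dedup (p ++ t) = PySem.List.dedup p ++ r := by
  simpa [PySem.List.dedup, PySem.Set.ofList_eq_foldl, List.foldl_append]
    using pvFoldl_add_prefix t (List.foldl PySem.Set.add [] p)

-- the rank of c is stable once c has been seen
theorem pvEmitRank_stable (p t : List Char) (c : Char) (hc : c ∈ p) :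
    pvEmitRank (PySem.List.dedup (p ++ t)) c = pvEmitRank (PySem.List.dedup p) c := by
  rcases pvDedup_append_prefix p t with ⟨r, hr⟩
  unfold pvEmitRank
  rw [hr, PySem.List.index?_append_of_mem r (by simpa [PySem.List.mem_dedup] using hc)]

theorem pvEnum_snoc (u : List Char) (c : Char) : ∀ s,
    PySem.List.enumerate (u ++ [c]) s = PySem.List.enumerate u s ++ [(s + (u.length : Int), c)] := by
  induction u with
  | nil => intro s; simp [PySem.List.enumerate_cons, PySem.List.enumerate_nil]
  | cons x xs ih =>
      intro s
      simp only [List.cons_append, PySem.List.enumerate_cons, ih (s + 1), List.length_cons,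
        Nat.cast_add, Nat.cast_one]
      rw [show s + 1 + (xs.length : Int) = s + ((xs.length : Int) + 1) by ring]

-- get? of the invariant dict, numbering from 1
theorem pvDictOf_get1 (u : List Char) (c : Char) :
    (pvDictOf u).get? c = (PySem.List.index? u c).map (fun i : Nat => 1 + (i : Int)) := by
  unfold pvDictOf
  exact pvDictOf_get? u 1 c

-- one A-step from the invariant state
theorem pvAStep_inv (p : List Char) (out : List Char) (c : Char) :
    pvAStep (pvDictOf (PySem.List.dedup p), out, ((PySem.List.dedup p).length : Int) + 1) c
      = (pvDictOf (PySem.List.dedup (p ++ [c])),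
         out ++ pvEmitRank (PySem.List.dedup (p ++ [c])) c,
         ((PySem.List.dedup (p ++ [c])).length : Int) + 1) := by
  by_cases h : c ∈ p
  · have hmem : c ∈ PySem.List.dedup p := by simpa [PySem.List.mem_dedup] using h
    have hd : PySem.List.dedup (p ++ [c]) = PySem.List.dedup p := by
      rw [pvDedup_snoc]; unfold PySem.Set.add; rw [if_pos]; simp [h]
    obtain ⟨k, hk⟩ : ∃ k, PySem.List.index? (PySem.List.dedup p) c = some k :=
      Option.isSome_iff_exists.mp ((PySem.List.index?_isSome_iff _ _).mpr hmem)
    have hcont : (pvDictOf (PySem.List.dedup p)).contains c = true := by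
      rw [pvDictOf_contains]; simp [h]
    have hget : (pvDictOf (PySem.List.dedup p)).getD c 0 = (k : Int) + 1 := by
      rw [PySem.Dict.getD, pvDictOf_get1, hk]; simp [add_comm]
    unfold pvAStep pvEmitRank
    dsimp only
    rw [hd, hcont, hk]
    rw [if_pos rfl]
    dsimp only
    rw [hget]
    rfl
  · have hmem : c ∉ PySem.List.dedup p := by simpa [PySem.List.mem_dedup] using h
    have hd : PySem.List.dedup (p ++ [c]) = PySem.List.dedup p ++ [c] := by
      rw [pvDedup_snoc]; unfold PySem.Set.add; rw [if_neg]; simp [h]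
    have hcont : (pvDictOf (PySem.List.dedup p)).contains c = false := by
      rw [pvDictOf_contains]; simp [h]
    have hins : (pvDictOf (PySem.List.dedup p)).insert c (((PySem.List.dedup p).length : Int) + 1)
        = pvDictOf (PySem.List.dedup p ++ [c]) := by
      unfold PySem.Dict.insert
      rw [if_neg (by rw [hcont]; simp)]
      unfold pvDictOf
      rw [pvEnum_snoc _ _ 1]
      simp [add_comm]
    have hgetins : ((pvDictOf (PySem.List.dedup p)).insert c
          (((PySem.List.dedup p).length : Int) + 1)).getD c 0
        = ((PySem.List.dedup p).length : Int) + 1 := by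
      rw [PySem.Dict.getD, PySem.Dict.get?_insert_self]; rfl
    have hidx := PySem.List.index?_append_singleton_self (PySem.List.dedup p) c hmem
    unfold pvAStep pvEmitRank
    dsimp only
    rw [hd, hcont, hidx]
    rw [if_neg (by simp)]
    dsimp only
    rw [hgetins, hins]
    simp [List.length_append]

theorem pvLoop (rest : List Char) : ∀ (p out : List Char),
    (rest.foldl pvAStep (pvDictOf (PySem.List.dedup p), out, ((PySem.List.dedup p).length : Int) + 1)).2.1
      = out ++ (rest.map (fun c => pvEmitRank (PySem.List.dedup (p ++ rest)) c)).flatten := by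
  induction rest with
  | nil => intro p out; simp
  | cons c cs ih =>
      intro c_1 out
      rw [List.foldl_cons, pvAStep_inv, ih (c_1 ++ [c])]
      have hstab := pvEmitRank_stable (c_1 ++ [c]) cs c (by simp)
      have hx : (c_1 ++ [c]) ++ cs = c_1 ++ c :: cs := by simp
      rw [hx] at hstab ⊢
      rw [← hstab, List.map_cons, List.flatten_cons, List.append_assoc]

-- find of a one-char needle is the index of its first occurrence
theorem pvFind_singleton (l : List Char) (c : Char) (pre suf : List Char)
    (hdec : l = pre ++ c :: suf) (hpre : c ∉ pre) :
    PySem.Chars.find l [c] = (pre.length : Int) := by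
  have hinf : [c] <:+: l := ⟨pre, suf, by simpa using hdec.symm⟩
  have hnn : 0 ≤ PySem.Chars.find l [c] := (PySem.Chars.find_nonneg_iff l [c]).mpr hinf
  obtain ⟨hpref, hmin⟩ := PySem.Chars.find_spec hnn
  set m := (PySem.Chars.find l [c]).toNat with hm
  have hk : [c] <+: l.drop pre.length := by
    rw [hdec, List.drop_left' rfl]
    exact ⟨suf, rfl⟩
  have hle : m ≤ pre.length := by
    by_contra hlt
    exact hmin pre.length (by omega) hk
  have hge : pre.length ≤ m := by
    by_contra hcon
    have hlt : m < pre.length := Nat.lt_of_not_le hcon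
    -- then l[m] = c with m < pre.length, so c ∈ pre
    rcases hpref with ⟨t, ht⟩
    have hcm : l[m]? = some c := by
      have h0 : (l.drop m)[0]? = some c := by rw [← ht]; rfl
      simpa [List.getElem?_drop] using h0
    have hcp : pre[m]? = some c := by
      rw [hdec] at hcm
      rwa [List.getElem?_append_left hlt] at hcm
    exact hpre (List.mem_of_getElem? hcp)
  have hmeq : m = pre.length := le_antisymm hle hge
  omega

-- B's emitted digits for c ∈ l equal the rank digits A emits
theorem pvEmit_eq (s : String) (c : Char) (hc : c ∈ s.toList) :
    pvEmitRank (PySem.List.dedup s.toList) c = pvBEmit s c := by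
  obtain ⟨k, hk⟩ : ∃ k, PySem.List.index? s.toList c = some k :=
    Option.isSome_iff_exists.mp ((PySem.List.index?_isSome_iff _ _).mpr hc)
  obtain ⟨pre, suf, hdec, hlen, hpre⟩ := (PySem.List.index?_eq_some_iff _ _ _).mp hk
  -- find = k
  have hfind : PySem.Str.find s (String.ofList [c]) = (pre.length : Int) := by
    rw [PySem.Str.find_eq]
    simpa using pvFind_singleton s.toList c pre suf hdec hpre
  -- the sliced prefix is pre ++ [c]
  have hslice : (PySem.Str.slice s none (some (PySem.Str.find s (String.ofList [c]) + 1))).toList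
      = pre ++ [c] := by
    rw [PySem.Str.toList_slice, hfind]
    have : (pre.length : Int) + 1 = ((pre.length + 1 : Nat) : Int) := by push_cast; ring
    rw [this, PySem.Chars.slice_eq_listSlice, PySem.List.slice_to_natCast, hdec]
    rw [show pre.length + 1 = pre.length + 1 from rfl, ← List.singleton_append,
      ← List.append_assoc]
    rw [show pre.length + 1 = (pre ++ [c]).length by simp]
    exact List.take_left
  -- c ∉ dedup pre
  have hcnd : c ∉ PySem.List.dedup pre := by simpa [PySem.List.mem_dedup] using hpre
  have hdps : PySem.List.dedup (pre ++ [c]) = PySem.List.dedup pre ++ [c] := by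
    rw [pvDedup_snoc]; unfold PySem.Set.add
    rw [if_neg]; simpa [PySem.List.mem_dedup] using hpre
  -- rank side: index? (dedup l) c = some (dedup pre).length
  have hrank : PySem.List.index? (PySem.List.dedup s.toList) c
      = some (PySem.List.dedup pre).length := by
    have h1 : s.toList = (pre ++ [c]) ++ suf := by rw [hdec]; simp
    rcases pvDedup_append_prefix (pre ++ [c]) suf with ⟨r, hr⟩
    rw [h1, hr, PySem.List.index?_append_of_mem r (by simp), hdps,
      PySem.List.index?_append_singleton_self _ _ hcnd]
  unfold pvEmitRank pvBEmit
  rw [hrank, hslice]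
  have : PySem.Set.len (PySem.Set.ofList (pre ++ [c])) = (PySem.List.dedup pre).length + 1 := by
    have : PySem.Set.ofList (pre ++ [c]) = PySem.List.dedup (pre ++ [c]) := by
      simp [PySem.List.dedup_eq_ofList]
    rw [PySem.Set.len, this, hdps]
    exact List.length_append ▸ rfl
  rw [this]
  simp

-- ===== VERDICT (by name: the statement is the Claim_ definition above) =====
theorem convert_to_base_string_spec : Claim_equal_convert_to_base_string := by
  intro s _
  unfold Spec_convert_to_base_string convert_to_base_string convert_to_base_string_alt
  dsimp only
  have hfold := pvLoop s.toList [] []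
  simp only [List.nil_append] at hfold
  have h2 : (pvDictOf (PySem.List.dedup ([] : List Char)), ([] : List Char),
        ((PySem.List.dedup ([] : List Char)).length : Int) + 1)
      = ((PySem.Dict.empty : PySem.Dict Char Int), ([] : List Char), (1 : Int)) := by decide
  rw [h2] at hfold
  rw [hfold]
  exact congrArg (fun l => String.ofList l.flatten)
    (List.map_congr_left (fun c hc => pvEmit_eq s c hc))
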